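-- pv_equiv track=rewrite | github.com/veeraollila/trak24s | viikko_5/restaurant.py | find
-- ===== SOURCE A (Python) =====
-- def find(a, d):
--
--     sorted_events = sorted([(time, 'arrival') for time in a] + [(time, 'departure') for time in d])
--
--     customers = 0
--     longest_waiting_time = 0
--     last_departure = None
--
--     for aika, event_type in sorted_events:
--         if event_type == 'arrival':
--
--             if customers == 0 and last_departure is not None and aika > last_departure:
--                 longest_waiting_time = max(longest_waiting_time, aika - last_departure)
--             customers += 1
--             last_departure = None
--         else:
--             customers -= 1
--             if customers == 0:
--                 last_departure = aika
--
--     return longest_waiting_time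
-- ===== SOURCE B (Python) =====
-- def _bisect_right(xs, u):
--     # index of the first element of sorted xs strictly greater than u
--     lo, hi = 0, len(xs)
--     while lo < hi:
--         mid = (lo + hi) // 2
--         if xs[mid] <= u:
--             lo = mid + 1
--         else:
--             hi = mid
--     return lo
--
--
-- def find(a, d):
--     sa = sorted(a)
--     sd = sorted(d)
--     best = 0
--     for u in sd:
--         # restaurant is empty right after time u iff arrivals and
--         # departures up to u balance out
--         i = _bisect_right(sa, u)
--         j = _bisect_right(sd, u)
--         if i != j:
--             continue
--         if i == len(sa):
--             continue                 # no arrival ever again: no gap closes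
--         v = sa[i]                    # first arrival after u
--         if j < len(sd) and sd[j] < v:
--             continue                 # a departure interrupts before v
--         best = max(best, v - u)
--     return best
-- ===== Notes on version B (the rewrite author's own statement) =====
-- stated objective: alternative
-- what changed: B never builds or sweeps a merged event list and keeps no running customer counter: it sorts arrivals and departures separately and, for each departure time u, decides by hand-rolled binary search whether the counts of arrivals and departures up to u balance (restaurant empty at u), takes the first arrival after u as the gap end unless the first departure after u comes earlier, and maxes the resulting gaps.
import Mathlib
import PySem

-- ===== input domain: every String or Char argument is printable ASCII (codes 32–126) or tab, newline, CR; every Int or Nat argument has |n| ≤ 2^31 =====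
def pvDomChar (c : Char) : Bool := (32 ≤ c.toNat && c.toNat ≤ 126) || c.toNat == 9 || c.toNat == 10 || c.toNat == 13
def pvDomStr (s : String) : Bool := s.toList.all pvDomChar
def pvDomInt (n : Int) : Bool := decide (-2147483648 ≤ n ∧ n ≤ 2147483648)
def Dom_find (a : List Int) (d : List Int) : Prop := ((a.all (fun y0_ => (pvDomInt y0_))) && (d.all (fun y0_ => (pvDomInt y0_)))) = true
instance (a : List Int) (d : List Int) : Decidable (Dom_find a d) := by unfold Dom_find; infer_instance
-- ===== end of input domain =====

-- B drops A's merged event sweep entirely: it sorts the two lists separately and, per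
-- departure u, uses binary searches (rank of u among arrivals vs departures) to decide
-- whether the restaurant empties at u and where the next arrival/departure after u lie
-- (alternative algorithm; same asymptotic cost).


-- ===== PORT A =====
-- the 'for aika, event_type in sorted_events' loop with state (customers, longest_waiting_time, last_departure)
def findLoop : List (Int × String) → Int → Int → Option Int → Int
  | [], _, best, _ => best
  | (t, ty) :: rest, c, best, last =>
    if ty = "arrival" then
      let best' :=
        if c = 0 then
          match last with
          | some u => if u < t then max best (t - u) else best
          | none => best
        else best
      findLoop rest (c + 1) best' none
    else
      let c' := c - 1
      findLoop rest c' best (if c' = 0 then some t else last)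

def find (a : List Int) (d : List Int) : Int :=
  let events := PySem.List.sorted2
    (a.map (fun t => (t, "arrival")) ++ d.map (fun t => (t, "departure")))
    (fun p => p.1) (fun p => p.2)
  findLoop events 0 0 none

-- ===== PORT B =====
-- Source B's hand-written _bisect_right: the 'while lo < hi' binary-search loop
-- (fuel only makes the loop total: hi - lo shrinks every iteration, so
-- xs.length iterations always suffice and the fuel never runs out)
def bisectGo (xs : List Int) (u : Int) : Nat → Int → Int → Int
  | 0, lo, _ => lo
  | fuel + 1, lo, hi =>
    if lo < hi then
      let mid := PySem.Int.floordiv (lo + hi) 2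
      if (PySem.List.pyGet? xs mid).getD 0 ≤ u then bisectGo xs u fuel (mid + 1) hi  -- xs[mid]: mid is always in range when called from pyBisectRight
      else bisectGo xs u fuel lo mid
    else lo

def pyBisectRight (xs : List Int) (u : Int) : Int := bisectGo xs u xs.length 0 xs.length

-- the 'for u in sd' loop of Source B (continue-chain as nested guards)
def altLoop (sa sd : List Int) : List Int → Int → Int
  | [], best => best
  | u :: us, best =>
    let i := pyBisectRight sa u
    let j := pyBisectRight sd u
    let best' :=
      if i ≠ j then best
      else if i = (sa.length : Int) then best
      else
        let v := (PySem.List.pyGet? sa i).getD 0   -- sa[i]; here 0 ≤ i < len sa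
        if j < (sd.length : Int) ∧ (PySem.List.pyGet? sd j).getD 0 < v then best
        else max best (v - u)
    altLoop sa sd us best'

def find_alt (a : List Int) (d : List Int) : Int :=
  let sa := PySem.List.sorted a (fun x => x)
  let sd := PySem.List.sorted d (fun x => x)
  altLoop sa sd sd 0

-- ===== PRECONDITION & SPEC =====
def Spec_find (a : List Int) (d : List Int) (out : Int) : Prop := out = find_alt a d
instance (a : List Int) (d : List Int) (out : Int) : Decidable (Spec_find a d out) := by unfold Spec_find; infer_instance

-- ===== CLAIM (what is proved, stated in full; the proofs are below) =====
def Claim_equal_find : Prop := ∀ (a : List Int) (d : List Int), Dom_find a d → Spec_find a d (find a d)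

-- ===== LEMMAS AND PROOFS =====


-- proof-side: the lexicographic tuple order Python's sort uses, packed into one Int
def evKey (p : Int × String) : Int := 2 * p.1 + (if p.2 = "arrival" then 0 else 1)
def evKey' (p : Int × Int) : Int := 2 * p.1 + (if p.2 = 1 then 0 else 1)
def Tagged (p : Int × String) : Prop := p.2 = "arrival" ∨ p.2 = "departure"
def evBefore (p q : Int × String) : Bool :=
  decide (p.1 < q.1) || (!decide (q.1 < p.1) && decide (p.2 < q.2))
def tagOf (p : Int × Int) : Int × String := (p.1, if p.2 = 1 then "arrival" else "departure")

-- proof-side reference: the sorted merged ±1 event list (A's sorted event list, untagged)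
def mergeEvents : List Int → List Int → List (Int × Int)
  | [], ds => ds.map (fun t => (t, -1))
  | x :: xs, [] => (x :: xs).map (fun t => (t, 1))
  | x :: xs, y :: ys =>
    if x ≤ y then (x, 1) :: mergeEvents xs (y :: ys)
    else (y, -1) :: mergeEvents (x :: xs) ys

-- proof-side reshaping of A's sweep: head-peeking recursion emitting depart→arrive gaps
def scanB : List (Int × Int) → Int → Int → Int
  | [], _, best => best
  | (t, dl) :: rest, c, best =>
    let c' := c + dl
    let best' := match rest.head? with
      | some (t2, dl2) => if dl = -1 ∧ c' = 0 ∧ dl2 = 1 then max best (t2 - t) else best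
      | none => best
    scanB rest c' best'

-- the pending gap A's last_departure still owes relative to scanB's one-step-early accounting
def pend (last : Option Int) (c best : Int) : List (Int × Int) → Int
  | (t, dl) :: _ =>
    match last with
    | some u => if c = 0 ∧ dl = 1 then max best (t - u) else best
    | none => best
  | [] => best

lemma evBefore_iff (p q : Int × String) (hp : Tagged p) (hq : Tagged q) :
    evBefore p q = true ↔ evKey p < evKey q := by
  obtain ⟨t, s⟩ := p; obtain ⟨t', s'⟩ := q
  have s1 : ("arrival" : String) < "departure" := by
    rw [String.lt_iff_toList_lt]; exact List.lex_eq_true_iff_lt.mp rfl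
  have s2 : ¬ ("departure" : String) < "arrival" := by simp; decide
  have s5 : ("arrival" : String) ≠ "departure" := by decide
  rcases hp with hp | hp <;> rcases hq with hq | hq <;> subst hp <;> subst hq <;>
    simp [evBefore, evKey, s1, s2, s5.symm] <;> omega

lemma evKey_inj (p q : Int × String) (hp : Tagged p) (hq : Tagged q)
    (h : evKey p = evKey q) : p = q := by
  obtain ⟨t, s⟩ := p; obtain ⟨t', s'⟩ := q
  have s5 : ("arrival" : String) ≠ "departure" := by decide
  rcases hp with hp | hp <;> rcases hq with hq | hq <;> subst hp <;> subst hq <;>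
    simp_all [evKey, s5.symm] <;> omega

lemma pairwise_insertBy (x : Int × String) (ys : List (Int × String))
    (hx : Tagged x) (hys : ∀ y ∈ ys, Tagged y)
    (h : ys.Pairwise (fun p q => evKey p ≤ evKey q)) :
    (PySem.List.insertBy evBefore x ys).Pairwise (fun p q => evKey p ≤ evKey q) := by
  induction ys with
  | nil => simp [PySem.List.insertBy]
  | cons y ys ih =>
    have hy : Tagged y := hys y (by simp)
    by_cases hb : evBefore x y = true
    · have hxy : evKey x < evKey y := (evBefore_iff x y hx hy).mp hb
      rw [show PySem.List.insertBy evBefore x (y :: ys) = x :: y :: ys by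
        simp [PySem.List.insertBy, hb]]
      refine List.Pairwise.cons ?_ h
      intro z hz
      rcases List.mem_cons.mp hz with hz | hz
      · subst hz; omega
      · have := (List.pairwise_cons.mp h).1 z hz; omega
    · have hyx : evKey y ≤ evKey x := by
        by_contra hlt
        exact hb ((evBefore_iff x y hx hy).mpr (by omega))
      rw [show PySem.List.insertBy evBefore x (y :: ys) =
            y :: PySem.List.insertBy evBefore x ys by
        simp [PySem.List.insertBy, hb]]
      refine List.Pairwise.cons ?_ (ih (fun z hz => hys z (by simp [hz]))
        (List.pairwise_cons.mp h).2)
      intro z hz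
      rcases (PySem.List.mem_insertBy _ _ _ _).mp hz with hz | hz
      · subst hz; exact hyx
      · exact (List.pairwise_cons.mp h).1 z hz

lemma pairwise_fold (xs : List (Int × String)) :
    ∀ acc : List (Int × String), (∀ p ∈ xs, Tagged p) → (∀ p ∈ acc, Tagged p) →
    acc.Pairwise (fun p q => evKey p ≤ evKey q) →
    (xs.foldl (fun acc x => PySem.List.insertBy evBefore x acc) acc).Pairwise
      (fun p q => evKey p ≤ evKey q) := by
  induction xs with
  | nil => intro acc _ _ h; simpa using h
  | cons z zs ih =>
    intro acc hxs hacc h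
    simp only [List.foldl_cons]
    refine ih _ (fun q hq => hxs q (by simp [hq])) ?_ ?_
    · intro q hq
      rcases (PySem.List.mem_insertBy _ _ _ _).mp hq with hq | hq
      · subst hq; exact hxs _ (by simp)
      · exact hacc q hq
    · exact pairwise_insertBy z acc (hxs z (by simp)) hacc h

lemma eq_of_perm_of_pairwise :
    ∀ (l1 l2 : List (Int × String)), (∀ p ∈ l1, Tagged p) → l1.Perm l2 →
    l1.Pairwise (fun p q => evKey p ≤ evKey q) →
    l2.Pairwise (fun p q => evKey p ≤ evKey q) → l1 = l2 := by
  intro l1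
  induction l1 with
  | nil => intro l2 _ hp _ _; exact hp.nil_eq
  | cons x xs ih =>
    intro l2 htag hp h1 h2
    cases l2 with
    | nil => simpa using hp.length_eq
    | cons y ys =>
      have hxy : x = y := by
        have hy1 : y ∈ x :: xs := hp.mem_iff.mpr (by simp)
        have hx2 : x ∈ y :: ys := hp.mem_iff.mp (by simp)
        rcases List.mem_cons.mp hy1 with h | h
        · exact h.symm
        rcases List.mem_cons.mp hx2 with h' | h'
        · exact h'
        have k1 : evKey x ≤ evKey y := (List.pairwise_cons.mp h1).1 y h
        have k2 : evKey y ≤ evKey x := (List.pairwise_cons.mp h2).1 x h'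
        exact evKey_inj x y (htag x (by simp)) (htag y hy1) (by omega)
      subst hxy
      have : xs = ys := ih ys (fun p hp' => htag p (by simp [hp'])) (hp.cons_inv)
        (List.pairwise_cons.mp h1).2 (List.pairwise_cons.mp h2).2
      rw [this]

lemma mergeEvents_perm : ∀ (xs ys : List Int),
    (mergeEvents xs ys).Perm (xs.map (fun t => (t, (1:Int))) ++ ys.map (fun t => (t, (-1:Int)))) := by
  intro xs ys
  induction xs, ys using mergeEvents.induct with
  | case1 ds => simp [mergeEvents]
  | case2 x xs => simp [mergeEvents]
  | case3 x xs y ys hle ih =>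
    rw [show mergeEvents (x :: xs) (y :: ys) = (x, 1) :: mergeEvents xs (y :: ys) by
      simp [mergeEvents, hle]]
    simpa using ih.cons (x, 1)
  | case4 x xs y ys hle ih =>
    rw [show mergeEvents (x :: xs) (y :: ys) = (y, -1) :: mergeEvents (x :: xs) ys by
      simp [mergeEvents, hle]]
    exact (ih.cons (y, -1)).trans List.perm_middle.symm

lemma mergeEvents_mem (xs ys : List Int) (p : Int × Int) (hp : p ∈ mergeEvents xs ys) :
    (p.2 = 1 ∧ p.1 ∈ xs) ∨ (p.2 = -1 ∧ p.1 ∈ ys) := by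
  have := (mergeEvents_perm xs ys).mem_iff.mp hp
  rcases List.mem_append.mp this with h | h <;>
    obtain ⟨t, ht, rfl⟩ := List.mem_map.mp h
  · exact Or.inl ⟨rfl, ht⟩
  · exact Or.inr ⟨rfl, ht⟩

lemma mergeEvents_pairwise : ∀ (xs ys : List Int),
    xs.Pairwise (· ≤ ·) → ys.Pairwise (· ≤ ·) →
    (mergeEvents xs ys).Pairwise (fun p q => evKey' p ≤ evKey' q) := by
  intro xs ys
  induction xs, ys using mergeEvents.induct with
  | case1 ds =>
    intro _ hd
    simp only [mergeEvents]
    exact hd.map _ (by intro a b hab; simp [evKey']; omega)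
  | case2 x xs =>
    intro hx _
    simp only [mergeEvents]
    exact hx.map _ (by intro a b hab; simp [evKey']; omega)
  | case3 x xs y ys hle ih =>
    intro hx hy
    rw [show mergeEvents (x :: xs) (y :: ys) = (x, 1) :: mergeEvents xs (y :: ys) by
      simp [mergeEvents, hle]]
    refine List.Pairwise.cons ?_ (ih (List.pairwise_cons.mp hx).2 hy)
    intro z hz
    rcases mergeEvents_mem _ _ z hz with ⟨h2, h1⟩ | ⟨h2, h1⟩
    · have := (List.pairwise_cons.mp hx).1 z.1 h1
      simp [evKey', h2]; omega
    · have : y ≤ z.1 := by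
        rcases List.mem_cons.mp h1 with h | h
        · omega
        · exact (List.pairwise_cons.mp hy).1 z.1 h
      simp [evKey', h2]; omega
  | case4 x xs y ys hle ih =>
    intro hx hy
    rw [show mergeEvents (x :: xs) (y :: ys) = (y, -1) :: mergeEvents (x :: xs) ys by
      simp [mergeEvents, hle]]
    refine List.Pairwise.cons ?_ (ih hx (List.pairwise_cons.mp hy).2)
    intro z hz
    rcases mergeEvents_mem _ _ z hz with ⟨h2, h1⟩ | ⟨h2, h1⟩
    · have : x ≤ z.1 := by
        rcases List.mem_cons.mp h1 with h | h
        · omega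
        · exact (List.pairwise_cons.mp hx).1 z.1 h
      simp [evKey', h2]; omega
    · have := (List.pairwise_cons.mp hy).1 z.1 h1
      simp [evKey', h2]; omega

lemma evKey_tagOf (p : Int × Int) : evKey (tagOf p) = evKey' p := by
  have s5 : ("arrival" : String) ≠ "departure" := by decide
  by_cases h : p.2 = 1 <;> simp [evKey, evKey', tagOf, h, s5.symm]

-- A's sorted tagged event list is the tag of the merge of the sorted inputs
lemma sort_eq (a d : List Int) :
    PySem.List.sorted2
      (a.map (fun t => (t, "arrival")) ++ d.map (fun t => (t, "departure")))
      (fun p => p.1) (fun p => p.2)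
    = (mergeEvents (PySem.List.sorted a (fun x => x)) (PySem.List.sorted d (fun x => x))).map tagOf := by
  set evs := a.map (fun t => (t, "arrival")) ++ d.map (fun t => (t, "departure")) with hevs
  have htag : ∀ p ∈ evs, Tagged p := by
    intro p hp
    rcases List.mem_append.mp hp with h | h <;>
      obtain ⟨t, _, rfl⟩ := List.mem_map.mp h
    · exact Or.inl rfl
    · exact Or.inr rfl
  have hperm1 : (PySem.List.sorted2 evs (fun p => p.1) (fun p => p.2)).Perm evs :=
    PySem.List.sorted2_perm _ _ _ _
  have htag1 : ∀ p ∈ PySem.List.sorted2 evs (fun p => p.1) (fun p => p.2), Tagged p :=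
    fun p hp => htag p (hperm1.mem_iff.mp hp)
  have hperm2 :
      ((mergeEvents (PySem.List.sorted a (fun x => x)) (PySem.List.sorted d (fun x => x))).map tagOf).Perm evs := by
    refine ((mergeEvents_perm _ _).map tagOf).trans ?_
    rw [List.map_append, List.map_map, List.map_map]
    have h1 : (tagOf ∘ fun t : Int => (t, (1:Int))) = fun t : Int => (t, "arrival") := by
      funext t; simp [tagOf]
    have h2 : (tagOf ∘ fun t : Int => (t, (-1:Int))) = fun t : Int => (t, "departure") := by
      funext t; norm_num [tagOf]
    rw [h1, h2, hevs]
    exact ((PySem.List.sorted_perm _ _ _).map _).append ((PySem.List.sorted_perm _ _ _).map _)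
  refine eq_of_perm_of_pairwise _ _ htag1 (hperm1.trans hperm2.symm) ?_ ?_
  · have hfold : PySem.List.sorted2 evs (fun p => p.1) (fun p => p.2)
        = evs.foldl (fun acc x => PySem.List.insertBy evBefore x acc) [] := rfl
    rw [hfold]
    exact pairwise_fold evs [] htag (by simp) (by simp)
  · refine List.Pairwise.map _ ?_
      (mergeEvents_pairwise _ _
        (by simpa using PySem.List.sorted_pairwise (xs := a) (key := fun x => x))
        (by simpa using PySem.List.sorted_pairwise (xs := d) (key := fun x => x)))
    intro p q hpq
    rw [evKey_tagOf, evKey_tagOf]; exact hpq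

-- the central sweep equivalence: A's state machine vs the pair scan, off by 'pend'
lemma sweep : ∀ (evs : List (Int × Int)) (c best : Int) (last : Option Int),
    0 ≤ best → (∀ p ∈ evs, p.2 = (1:Int) ∨ p.2 = -1) →
    findLoop (evs.map tagOf) c best last = scanB evs c (pend last c best evs) := by
  have sda : ("departure" : String) ≠ "arrival" := by decide
  intro evs
  induction evs with
  | nil => intro c best last _ _; cases last <;> rfl
  | cons e rest ih =>
    intro c best last hbest hdl
    obtain ⟨t, dl⟩ := e
    have hdl' : ∀ p ∈ rest, p.2 = (1:Int) ∨ p.2 = -1 := fun p hp => hdl p (by simp [hp])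
    rcases hdl (t, dl) (by simp) with h1 | h1 <;> subst h1
    · -- arrival event
      cases last with
      | none =>
        simp only [List.map_cons, tagOf, findLoop]
        norm_num
        rw [ih (c + 1) best none hbest hdl']
        cases rest with
        | nil => rfl
        | cons e2 r2 =>
          obtain ⟨t2, dl2⟩ := e2
          simp [scanB, pend]
      | some u =>
        simp only [List.map_cons, tagOf, findLoop]
        norm_num
        by_cases hc : c = 0
        · rw [if_pos hc]
          have hB : (if u < t then max best (t - u) else best) = max best (t - u) := by
            by_cases hu : u < t
            · rw [if_pos hu]
            · rw [if_neg hu]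
              exact (max_eq_left (by omega)).symm
          rw [hB]
          rw [ih (c + 1) (max best (t - u)) none (le_trans hbest (le_max_left _ _)) hdl']
          cases rest with
          | nil => simp [scanB, pend, hc]
          | cons e2 r2 =>
            obtain ⟨t2, dl2⟩ := e2
            simp [scanB, pend, hc]
        · rw [if_neg hc]
          rw [ih (c + 1) best none hbest hdl']
          cases rest with
          | nil => simp [scanB, pend, hc]
          | cons e2 r2 =>
            obtain ⟨t2, dl2⟩ := e2
            simp [scanB, pend, hc]
    · -- departure event
      have hpend : pend last c best ((t, -1) :: rest) = best := by
        cases last <;> simp [pend]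
      rw [hpend]
      simp only [List.map_cons, tagOf, findLoop]
      norm_num [sda]
      rw [ih (c - 1) best _ hbest hdl']
      by_cases hc : c - 1 = 0
      · rw [if_pos hc]
        cases rest with
        | nil => simp [scanB, pend]
        | cons e2 r2 =>
          obtain ⟨t2, dl2⟩ := e2
          by_cases h2 : dl2 = 1
          · simp [scanB, pend, hc, h2, show c + -1 = 0 by omega]
          · simp [scanB, pend, hc, h2, show c + -1 = 0 by omega]
      · rw [if_neg hc]
        have hL : pend last (c - 1) best rest = best := by
          cases last with
          | none => cases rest with
            | nil => rfl
            | cons e2 r2 => obtain ⟨t2, dl2⟩ := e2; simp [pend]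
          | some u => cases rest with
            | nil => rfl
            | cons e2 r2 => obtain ⟨t2, dl2⟩ := e2; simp [pend, hc]
        rw [hL]
        cases rest with
        | nil => simp [scanB]
        | cons e2 r2 =>
          obtain ⟨t2, dl2⟩ := e2
          simp [scanB, hc, show c + -1 = c - 1 by ring]


-- the list of depart→arrive gaps the scan emits, with running counter c
def gapsFrom : Int → List (Int × Int) → List Int
  | _, [] => []
  | c, (t, dl) :: rest =>
    (match rest.head? with
     | some (t2, dl2) => if dl = -1 ∧ c + dl = 0 ∧ dl2 = 1 then [t2 - t] else []
     | none => []) ++ gapsFrom (c + dl) rest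

def sumD (l : List (Int × Int)) : Int := (l.map Prod.snd).sum

lemma scanB_eq_foldl : ∀ (evs : List (Int × Int)) (c best : Int),
    scanB evs c best = List.foldl max best (gapsFrom c evs) := by
  intro evs
  induction evs with
  | nil => intro c best; rfl
  | cons e rest ih =>
    intro c best
    obtain ⟨t, dl⟩ := e
    cases h : rest.head? with
    | none => simp [scanB, gapsFrom, h, ih]
    | some e2 =>
      obtain ⟨t2, dl2⟩ := e2
      by_cases hg : dl = -1 ∧ c + dl = 0 ∧ dl2 = 1
      · obtain ⟨h1, h2, h3⟩ := hg
        subst h1; subst h3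
        simp [scanB, gapsFrom, h, h2, ih]
      · simp [scanB, gapsFrom, h, hg, ih]

lemma base_le_foldl_max : ∀ (l : List Int) (b : Int), b ≤ l.foldl max b := by
  intro l
  induction l with
  | nil => intro b; simp
  | cons x t ih => intro b; exact le_trans (le_max_left b x) (ih (max b x))

lemma mem_le_foldl_max (l : List Int) (b x : Int) (hx : x ∈ l) : x ≤ l.foldl max b := by
  induction l generalizing b with
  | nil => cases hx
  | cons y t ih =>
    rcases List.mem_cons.mp hx with h | h
    · subst h; exact le_trans (le_max_right b x) (base_le_foldl_max t (max b x))
    · exact ih (max b y) h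

lemma foldl_max_mem (l : List Int) (b : Int) : l.foldl max b = b ∨ l.foldl max b ∈ l := by
  induction l generalizing b with
  | nil => exact Or.inl rfl
  | cons x t ih =>
    rcases ih (max b x) with h | h
    · rcases max_cases b x with ⟨he, _⟩ | ⟨he, _⟩
      · refine Or.inl ?_
        rw [List.foldl_cons, h, he]
      · refine Or.inr ?_
        rw [List.foldl_cons, h, he]
        exact List.mem_cons_self
    · refine Or.inr ?_
      rw [List.foldl_cons]
      exact List.mem_cons_of_mem _ h

lemma foldl_max_congr_mem (l1 l2 : List Int) (b : Int)
    (h12 : ∀ x ∈ l1, x ∈ l2) (h21 : ∀ x ∈ l2, x ∈ l1) :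
    l1.foldl max b = l2.foldl max b := by
  apply le_antisymm
  · rcases foldl_max_mem l1 b with h | h
    · rw [h]; exact base_le_foldl_max _ _
    · exact mem_le_foldl_max _ _ _ (h12 _ h)
  · rcases foldl_max_mem l2 b with h | h
    · rw [h]; exact base_le_foldl_max _ _
    · exact mem_le_foldl_max _ _ _ (h21 _ h)

lemma mem_gapsFrom {x : Int} : ∀ {evs : List (Int × Int)} {c : Int},
    x ∈ gapsFrom c evs ↔
      ∃ P u v R, evs = P ++ (u, -1) :: (v, 1) :: R ∧ c + sumD P = 1 ∧ x = v - u := by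
  intro evs
  induction evs with
  | nil =>
    intro c
    constructor
    · intro h; cases h
    · rintro ⟨P, u, v, R, hP, -, -⟩
      exact absurd hP (by simp)
  | cons e rest ih =>
    intro c
    obtain ⟨t, dl⟩ := e
    constructor
    · intro hx
      rcases List.mem_append.mp hx with hh | hh
      · cases h : rest.head? with
        | none => rw [h] at hh; cases hh
        | some e2 =>
          obtain ⟨t2, dl2⟩ := e2
          rw [h] at hh
          have hh' : x ∈ (if dl = -1 ∧ c + dl = 0 ∧ dl2 = 1 then [t2 - t] else []) := hh
          by_cases hg : dl = -1 ∧ c + dl = 0 ∧ dl2 = 1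
          · rw [if_pos hg] at hh'
            obtain ⟨h1, h2, h3⟩ := hg
            have hx2 : x = t2 - t := by simpa using hh'
            obtain ⟨r2, hr2⟩ : ∃ r2, rest = (t2, dl2) :: r2 := by
              cases rest with
              | nil => simp at h
              | cons y r2 =>
                have hy : y = (t2, dl2) := by simpa using h
                exact ⟨r2, by rw [hy]⟩
            refine ⟨[], t, t2, r2, ?_, ?_, hx2⟩
            · simp [hr2, h1, h3]
            · simp [sumD]; omega
          · rw [if_neg hg] at hh'; cases hh'
      · obtain ⟨P', u, v, R, hP, hc, hxv⟩ := (ih (c := c + dl)).mp hh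
        exact ⟨(t, dl) :: P', u, v, R, by simp [hP], by simp [sumD] at hc ⊢; omega, hxv⟩
    · rintro ⟨P, u, v, R, hP, hc, hxv⟩
      cases P with
      | nil =>
        simp only [List.nil_append, List.cons.injEq, Prod.mk.injEq] at hP
        obtain ⟨⟨ht, hdl⟩, hrest⟩ := hP
        subst ht; subst hdl; subst hrest
        have hc1 : c = 1 := by simpa [sumD] using hc
        apply List.mem_append.mpr
        left
        simp [hc1, hxv]
      | cons p P' =>
        simp only [List.cons_append, List.cons.injEq] at hP
        obtain ⟨hpe, hrest⟩ := hP
        apply List.mem_append.mpr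
        right
        refine (ih (c := c + dl)).mpr ⟨P', u, v, R, hrest, ?_, hxv⟩
        have : p = (t, dl) := hpe.symm
        subst this
        simp [sumD] at hc ⊢
        omega


-- rank of u: number of elements ≤ u
def cnt (xs : List Int) (u : Int) : Int := ((xs.countP (fun x => decide (x ≤ u)) : Nat) : Int)

lemma cnt_nonneg (xs : List Int) (u : Int) : 0 ≤ cnt xs u := by
  simp [cnt]

lemma cnt_le_length (xs : List Int) (u : Int) : cnt xs u ≤ (xs.length : Int) := by
  simp only [cnt, Nat.cast_le]
  exact_mod_cast List.countP_le_length

lemma sorted_getElem_mono (xs : List Int) (hs : xs.Pairwise (· ≤ ·))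
    (k k' : Nat) (hk' : k' < xs.length) (hkk : k ≤ k') :
    xs[k]'(lt_of_le_of_lt hkk hk') ≤ xs[k'] := by
  rcases Nat.lt_or_ge k k' with h | h
  · exact (List.pairwise_iff_getElem.mp hs) k k' _ hk' h
  · have : k = k' := le_antisymm hkk h
    subst this; exact le_refl _

lemma cnt_eq_of (xs : List Int) (u : Int) :
    ∀ (c : Int), xs.Pairwise (· ≤ ·) → 0 ≤ c → c ≤ (xs.length : Int) →
    (∀ (k : Nat) (hk : k < xs.length), (k : Int) < c → xs[k] ≤ u) →
    (∀ (k : Nat) (hk : k < xs.length), c ≤ (k : Int) → u < xs[k]) →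
    cnt xs u = c := by
  induction xs with
  | nil =>
    intro c _ h0 hlen _ _
    simp only [List.length_nil, Nat.cast_zero] at hlen
    simp [cnt]; omega
  | cons x t ih =>
    intro c hs h0 hlen hlo hhi
    have hx : ∀ y ∈ t, x ≤ y := (List.pairwise_cons.mp hs).1
    have ht : t.Pairwise (· ≤ ·) := (List.pairwise_cons.mp hs).2
    by_cases hxu : x ≤ u
    · have hc1 : 1 ≤ c := by
        by_contra hc
        have := hhi 0 (by simp) (by omega)
        simp at this
        omega
      have hrec : cnt t u = c - 1 := by
        refine ih (c - 1) ht (by omega)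
          (by simp only [List.length_cons] at hlen; push_cast at hlen ⊢; omega) ?_ ?_
        · intro k hk hkc
          have := hlo (k + 1) (by simp; omega) (by push_cast; omega)
          simpa using this
        · intro k hk hkc
          have := hhi (k + 1) (by simp; omega) (by push_cast; omega)
          simpa using this
      have : (x :: t).countP (fun x => decide (x ≤ u)) = t.countP (fun x => decide (x ≤ u)) + 1 := by
        rw [List.countP_cons]
        simp [hxu]
      simp only [cnt, this] at *
      push_cast
      omega
    · have hc0 : c = 0 := by
        by_contra hc
        have := hlo 0 (by simp) (by omega)
        simp at this
        omega
      have hzero : (x :: t).countP (fun x => decide (x ≤ u)) = 0 := by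
        rw [List.countP_eq_zero]
        intro y hy
        rcases List.mem_cons.mp hy with h | h
        · subst h; simpa using hxu
        · have := hx y h
          simp; omega
      simp [cnt, hzero, hc0]

lemma bisectGo_eq (xs : List Int) (u : Int) (hs : xs.Pairwise (· ≤ ·)) :
    ∀ (fuel : Nat) (lo hi : Int), (hi - lo).toNat ≤ fuel → 0 ≤ lo → lo ≤ hi → hi ≤ (xs.length : Int) →
    (∀ (k : Nat) (hk : k < xs.length), (k : Int) < lo → xs[k] ≤ u) →
    (∀ (k : Nat) (hk : k < xs.length), hi ≤ (k : Int) → u < xs[k]) →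
    bisectGo xs u fuel lo hi = cnt xs u := by
  intro fuel
  induction fuel with
  | zero =>
    intro lo hi hn h0 hlh hhl hlo hhi
    have hlh' : lo = hi := by omega
    exact (cnt_eq_of xs u lo hs h0 (by omega) hlo (fun k hk hkc => hhi k hk (by omega))).symm
  | succ n ihn =>
    intro lo hi hn h0 hlh hhl hlo hhi
    rw [bisectGo]
    by_cases h : lo < hi
    · rw [if_pos h]
      have e : PySem.Int.floordiv (lo + hi) 2 = (lo + hi) / 2 :=
        PySem.Int.floordiv_eq_ediv_of_pos (by omega)
      simp only [e]
      have hmid : lo ≤ (lo + hi) / 2 ∧ (lo + hi) / 2 < hi := by omega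
      have hmlen : (lo + hi) / 2 < (xs.length : Int) := by omega
      have hmnat : ((lo + hi) / 2).toNat < xs.length := by omega
      rw [PySem.List.pyGet?_eq_some_getElem xs (by omega) hmlen]
      simp only [Option.getD_some]
      by_cases hb : xs[((lo + hi) / 2).toNat] ≤ u
      · rw [if_pos hb]
        refine ihn ((lo + hi) / 2 + 1) hi (by omega)
          (by omega) (by omega) hhl ?_ hhi
        intro k hk hkc
        calc xs[k] ≤ xs[((lo + hi) / 2).toNat] :=
              sorted_getElem_mono xs hs k ((lo + hi) / 2).toNat hmnat (by omega)
          _ ≤ u := hb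
      · rw [if_neg hb]
        refine ihn lo ((lo + hi) / 2) (by omega) h0
          (by omega) (by omega) hlo ?_
        intro k hk hkc
        have : xs[((lo + hi) / 2).toNat] ≤ xs[k] :=
          sorted_getElem_mono xs hs ((lo + hi) / 2).toNat k hk (by omega)
        omega
    · rw [if_neg h]
      exact (cnt_eq_of xs u lo hs h0 (by omega) hlo (fun k hk hkc => hhi k hk (by omega))).symm

lemma pyBisect_eq (xs : List Int) (u : Int) (hs : xs.Pairwise (· ≤ ·)) :
    pyBisectRight xs u = cnt xs u := by
  refine bisectGo_eq xs u hs xs.length 0 (xs.length : Int) (by omega) (by omega) (by simp) (le_refl _) ?_ ?_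
  · intro k hk hkc; omega
  · intro k hk hkc
    exfalso
    have : (k : Int) < (xs.length : Int) := by exact_mod_cast hk
    omega

-- a sorted list splits into its ≤K part followed by its >K part
lemma sorted_filter_decomp {α : Type} (key : α → Int) (K : Int) :
    ∀ (l : List α), l.Pairwise (fun x y => key x ≤ key y) →
    l = l.filter (fun x => decide (key x ≤ K)) ++ l.filter (fun x => decide (K < key x)) := by
  intro l
  induction l with
  | nil => intro _; rfl
  | cons x t ih =>
    intro hs
    have hx : ∀ y ∈ t, key x ≤ key y := (List.pairwise_cons.mp hs).1
    have ht := (List.pairwise_cons.mp hs).2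
    by_cases hk : key x ≤ K
    · have e1 : (decide (key x ≤ K)) = true := by simpa using hk
      have e2 : (decide (K < key x)) = false := by simp; omega
      rw [List.filter_cons, List.filter_cons, e1, e2]
      simp only [if_true, if_false, Bool.false_eq_true]
      rw [List.cons_append]
      exact congrArg (x :: ·) (ih ht)
    · have h2 : K < key x := by omega
      have e1 : (decide (key x ≤ K)) = false := by simp; omega
      have e2 : (decide (K < key x)) = true := by simpa using h2
      have hnil : t.filter (fun y => decide (key y ≤ K)) = [] :=
        List.filter_eq_nil_iff.mpr (fun y hy => by have := hx y hy; simp; omega)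
      have hall : t.filter (fun y => decide (K < key y)) = t :=
        List.filter_eq_self.mpr (fun y hy => by have := hx y hy; simp; omega)
      rw [List.filter_cons, List.filter_cons, e1, e2]
      simp only [if_true, if_false, Bool.false_eq_true]
      rw [hnil, hall, List.nil_append]

lemma cnt_eq_filter_length (xs : List Int) (u : Int) :
    cnt xs u = ((xs.filter (fun x => decide (x ≤ u))).length : Int) := by
  simp [cnt, List.countP_eq_length_filter]

lemma cnt_lt_length_iff (xs : List Int) (u : Int) (hs : xs.Pairwise (· ≤ ·)) :
    cnt xs u < (xs.length : Int) ↔ ∃ w ∈ xs, u < w := by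
  have hdec : xs = xs.filter (fun x => decide (x ≤ u)) ++ xs.filter (fun x => decide (u < x)) :=
    sorted_filter_decomp (fun x => x) u xs hs
  constructor
  · intro h
    have hlen : xs.length = (xs.filter (fun x => decide (x ≤ u))).length
        + (xs.filter (fun x => decide (u < x))).length := by
      conv_lhs => rw [hdec]
      simp
    rw [cnt_eq_filter_length] at h
    have : (xs.filter (fun x => decide (u < x))).length ≠ 0 := by omega
    obtain ⟨w, hw⟩ := List.exists_mem_of_ne_nil (xs.filter (fun x => decide (u < x))) (by
      intro hq; rw [hq] at this; simp at this)
    have := List.mem_filter.mp hw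
    exact ⟨w, this.1, by simpa using this.2⟩
  · rintro ⟨w, hw, huw⟩
    have hwf : w ∈ xs.filter (fun x => decide (u < x)) :=
      List.mem_filter.mpr ⟨hw, by simpa using huw⟩
    have hlen : xs.length = (xs.filter (fun x => decide (x ≤ u))).length
        + (xs.filter (fun x => decide (u < x))).length := by
      conv_lhs => rw [hdec]
      simp
    have : (xs.filter (fun x => decide (u < x))).length ≠ 0 := by
      intro hq
      rw [List.length_eq_zero_iff] at hq
      rw [hq] at hwf; cases hwf
    have h1 := cnt_eq_filter_length xs u
    omega

lemma getD_cnt_spec (xs : List Int) (u : Int) (hs : xs.Pairwise (· ≤ ·))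
    (h : cnt xs u < (xs.length : Int)) :
    u < xs.getD (cnt xs u).toNat 0 ∧ xs.getD (cnt xs u).toNat 0 ∈ xs ∧
      ∀ w ∈ xs, u < w → xs.getD (cnt xs u).toNat 0 ≤ w := by
  have hdec : xs = xs.filter (fun x => decide (x ≤ u)) ++ xs.filter (fun x => decide (u < x)) :=
    sorted_filter_decomp (fun x => x) u xs hs
  set F1 := xs.filter (fun x => decide (x ≤ u)) with hF1
  set F2 := xs.filter (fun x => decide (u < x)) with hF2
  have hcnt : (cnt xs u).toNat = F1.length := by
    rw [cnt_eq_filter_length]; simp [hF1]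
  cases hF2e : F2 with
  | nil =>
    exfalso
    have : xs.length = F1.length := by
      conv_lhs => rw [hdec, hF2e]
      simp
    have h0 := cnt_nonneg xs u
    omega
  | cons w t =>
    have hget : xs.getD (cnt xs u).toNat 0 = w := by
      rw [hcnt]
      conv_lhs => rw [hdec, hF2e]
      rw [List.getD_eq_getElem?_getD, List.getElem?_append_right (le_refl _)]
      simp
    have hwF2 : w ∈ F2 := by rw [hF2e]; exact List.mem_cons_self
    have hwmem := List.mem_filter.mp hwF2
    refine ⟨by rw [hget]; simpa using hwmem.2, by rw [hget]; exact hwmem.1, ?_⟩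
    intro w' hw' huw'
    have hw'F2 : w' ∈ F2 := List.mem_filter.mpr ⟨hw', by simpa using huw'⟩
    have hF2s : F2.Pairwise (· ≤ ·) := List.Pairwise.filter _ hs
    rw [hF2e] at hw'F2 hF2s
    rcases List.mem_cons.mp hw'F2 with hh | hh
    · rw [hget, hh]
    · rw [hget]
      exact (List.pairwise_cons.mp hF2s).1 w' hh


-- the contribution of one departure u in B's loop, port-shaped
def gapAt (sa sd : List Int) (u : Int) : Option Int :=
  let i := pyBisectRight sa u
  let j := pyBisectRight sd u
  if i ≠ j then none
  else if i = (sa.length : Int) then none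
  else
    let v := (PySem.List.pyGet? sa i).getD 0
    if j < (sd.length : Int) ∧ (PySem.List.pyGet? sd j).getD 0 < v then none
    else some (v - u)

-- the same contribution phrased through the rank function cnt
def gapAt' (sa sd : List Int) (u : Int) : Option Int :=
  if cnt sa u ≠ cnt sd u then none
  else if cnt sa u = (sa.length : Int) then none
  else
    if cnt sd u < (sd.length : Int) ∧ sd.getD (cnt sd u).toNat 0 < sa.getD (cnt sa u).toNat 0 then none
    else some (sa.getD (cnt sa u).toNat 0 - u)

lemma altStep (sa sd : List Int) (u : Int) (us : List Int) (best : Int) :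
    altLoop sa sd (u :: us) best
      = altLoop sa sd us (match gapAt sa sd u with | none => best | some g => max best g) := by
  simp only [altLoop, gapAt]
  split_ifs <;> rfl

lemma altLoop_eq_foldl (sa sd : List Int) : ∀ (us : List Int) (best : Int),
    altLoop sa sd us best = List.foldl max best (us.filterMap (gapAt sa sd)) := by
  intro us
  induction us with
  | nil => intro best; rfl
  | cons u us ih =>
    intro best
    rw [altStep, List.filterMap_cons]
    cases hg : gapAt sa sd u with
    | none => simp [hg, ih]
    | some g => simp [hg, ih]

lemma gapAt_eq (sa sd : List Int) (hsa : sa.Pairwise (· ≤ ·)) (hsd : sd.Pairwise (· ≤ ·)) (u : Int) :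
    gapAt sa sd u = gapAt' sa sd u := by
  unfold gapAt gapAt'
  rw [pyBisect_eq sa u hsa, pyBisect_eq sd u hsd]
  by_cases h1 : cnt sa u ≠ cnt sd u
  · simp [h1]
  · by_cases h2 : cnt sa u = (sa.length : Int)
    · simp [h1, h2]
    · have hlt : cnt sa u < (sa.length : Int) := lt_of_le_of_ne (cnt_le_length sa u) h2
      have h0a := cnt_nonneg sa u
      have h0d := cnt_nonneg sd u
      have hga : (PySem.List.pyGet? sa (cnt sa u)).getD 0 = sa.getD (cnt sa u).toNat 0 := by
        rw [PySem.List.pyGet?_eq_some_getElem sa (cnt_nonneg sa u) hlt]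
        rw [List.getD_eq_getElem?_getD, List.getElem?_eq_getElem (by omega)]
      by_cases h3 : cnt sd u < (sd.length : Int)
      · have hgd : (PySem.List.pyGet? sd (cnt sd u)).getD 0 = sd.getD (cnt sd u).toNat 0 := by
          rw [PySem.List.pyGet?_eq_some_getElem sd (cnt_nonneg sd u) h3]
          rw [List.getD_eq_getElem?_getD, List.getElem?_eq_getElem (by omega)]
        simp [h1, h2, h3, hga, hgd]
      · simp [h1, h2, h3, hga]

-- evKey' arithmetic and injectivity on ±1 events
lemma evKey'_dep (u : Int) : evKey' (u, -1) = 2 * u + 1 := by norm_num [evKey']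
lemma evKey'_arr (v : Int) : evKey' (v, 1) = 2 * v := by norm_num [evKey']

lemma evKey'_inj (p q : Int × Int) (hp : p.2 = 1 ∨ p.2 = -1) (hq : q.2 = 1 ∨ q.2 = -1)
    (h : evKey' p = evKey' q) : p = q := by
  obtain ⟨t, dl⟩ := p; obtain ⟨t', dl'⟩ := q
  simp only at hp hq
  rcases hp with hp | hp <;> rcases hq with hq | hq <;> subst hp <;> subst hq <;>
    simp_all [evKey'] <;> omega

lemma merge_pm (sa sd : List Int) : ∀ p ∈ mergeEvents sa sd, p.2 = (1:Int) ∨ p.2 = -1 := by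
  intro p hp
  rcases mergeEvents_mem sa sd p hp with ⟨h, _⟩ | ⟨h, _⟩
  · exact Or.inl h
  · exact Or.inr h

lemma mem_merge_arr (sa sd : List Int) (w : Int) (h : w ∈ sa) :
    (w, (1:Int)) ∈ mergeEvents sa sd :=
  (mergeEvents_perm sa sd).mem_iff.mpr
    (List.mem_append.mpr (Or.inl (List.mem_map.mpr ⟨w, h, rfl⟩)))

lemma mem_merge_dep (sa sd : List Int) (w : Int) (h : w ∈ sd) :
    (w, (-1:Int)) ∈ mergeEvents sa sd :=
  (mergeEvents_perm sa sd).mem_iff.mpr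
    (List.mem_append.mpr (Or.inr (List.mem_map.mpr ⟨w, h, rfl⟩)))

lemma sumD_append (l1 l2 : List (Int × Int)) : sumD (l1 ++ l2) = sumD l1 + sumD l2 := by
  simp [sumD]

lemma sumD_count (l : List (Int × Int)) (h : ∀ p ∈ l, p.2 = (1:Int) ∨ p.2 = -1) :
    sumD l = ((l.countP (fun p => decide (p.2 = 1)) : Nat) : Int)
      - ((l.countP (fun p => decide (p.2 = -1)) : Nat) : Int) := by
  induction l with
  | nil => simp [sumD]
  | cons p t ih =>
    have hrec := ih (fun q hq => h q (by simp [hq]))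
    rcases h p (by simp) with hp | hp <;>
    · rw [List.countP_cons, List.countP_cons]
      simp only [sumD, List.map_cons, List.sum_cons] at hrec ⊢
      simp [hp]
      push_cast
      omega

lemma countE_arr (sa sd : List Int) (u : Int) :
    (mergeEvents sa sd).countP (fun p => decide (p.1 ≤ u) && decide (p.2 = 1))
      = sa.countP (fun x => decide (x ≤ u)) := by
  rw [(mergeEvents_perm sa sd).countP_eq]
  rw [List.countP_append, List.countP_map, List.countP_map]
  have h1 : ((fun p : Int × Int => decide (p.1 ≤ u) && decide (p.2 = 1)) ∘ (fun t : Int => (t, (1:Int))))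
      = fun t : Int => decide (t ≤ u) := by
    funext t; simp
  have h2 : ((fun p : Int × Int => decide (p.1 ≤ u) && decide (p.2 = 1)) ∘ (fun t : Int => (t, (-1:Int))))
      = fun _ : Int => false := by
    funext t; simp
  rw [h1, h2]
  simp

lemma countE_dep (sa sd : List Int) (u : Int) :
    (mergeEvents sa sd).countP (fun p => decide (p.1 ≤ u) && decide (p.2 = -1))
      = sd.countP (fun x => decide (x ≤ u)) := by
  rw [(mergeEvents_perm sa sd).countP_eq]
  rw [List.countP_append, List.countP_map, List.countP_map]
  have h1 : ((fun p : Int × Int => decide (p.1 ≤ u) && decide (p.2 = -1)) ∘ (fun t : Int => (t, (1:Int))))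
      = fun _ : Int => false := by
    funext t; simp
  have h2 : ((fun p : Int × Int => decide (p.1 ≤ u) && decide (p.2 = -1)) ∘ (fun t : Int => (t, (-1:Int))))
      = fun t : Int => decide (t ≤ u) := by
    funext t; simp
  rw [h1, h2]
  simp

-- the balance of the ≤u part of the merged event list is the rank difference
lemma filterK_sum (sa sd : List Int) (u : Int) :
    sumD ((mergeEvents sa sd).filter (fun p => decide (evKey' p ≤ 2 * u + 1)))
      = cnt sa u - cnt sd u := by
  have hpm := merge_pm sa sd
  have hfm : ∀ p ∈ (mergeEvents sa sd).filter (fun p => decide (evKey' p ≤ 2 * u + 1)),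
      p.2 = (1:Int) ∨ p.2 = -1 := fun p hp => hpm p (List.mem_filter.mp hp).1
  rw [sumD_count _ hfm, List.countP_filter, List.countP_filter]
  have e1 : (mergeEvents sa sd).countP
        (fun p => decide (p.2 = 1) && decide (evKey' p ≤ 2 * u + 1))
      = (mergeEvents sa sd).countP (fun p => decide (p.1 ≤ u) && decide (p.2 = 1)) := by
    apply List.countP_congr
    intro p hp
    rcases hpm p hp with h | h <;> obtain ⟨t, dl⟩ := p <;> simp only at h <;> subst h <;>
      simp [evKey'] <;> omega
  have e2 : (mergeEvents sa sd).countP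
        (fun p => decide (p.2 = -1) && decide (evKey' p ≤ 2 * u + 1))
      = (mergeEvents sa sd).countP (fun p => decide (p.1 ≤ u) && decide (p.2 = -1)) := by
    apply List.countP_congr
    intro p hp
    rcases hpm p hp with h | h <;> obtain ⟨t, dl⟩ := p <;> simp only at h <;> subst h <;>
      simp [evKey'] <;> omega
  rw [e1, e2, countE_arr, countE_dep]
  simp [cnt]


-- every gap the sweep emits is reported by B's per-departure test
lemma dirA (sa sd : List Int) (hsa : sa.Pairwise (· ≤ ·)) (hsd : sd.Pairwise (· ≤ ·))
    (x : Int) (hx : x ∈ gapsFrom 0 (mergeEvents sa sd)) :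
    ∃ u ∈ sd, gapAt' sa sd u = some x := by
  obtain ⟨P, u, v, R, hE, hc, hxv⟩ := mem_gapsFrom.mp hx
  have hpw : (mergeEvents sa sd).Pairwise (fun p q => evKey' p ≤ evKey' q) :=
    mergeEvents_pairwise sa sd hsa hsd
  have hpm := merge_pm sa sd
  rw [hE] at hpw
  obtain ⟨hPpw, hQpw, hcross⟩ := List.pairwise_append.mp hpw
  have hP : ∀ p ∈ P, evKey' p ≤ 2 * u + 1 := by
    intro p hp
    have := hcross p hp (u, -1) (by simp)
    rwa [evKey'_dep] at this
  have huv : u < v := by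
    have := (List.pairwise_cons.mp hQpw).1 (v, 1) (by simp)
    rw [evKey'_dep, evKey'_arr] at this
    omega
  have hQ : ∀ q ∈ (v, (1:Int)) :: R, 2 * u + 1 < evKey' q := by
    intro q hq
    rcases List.mem_cons.mp hq with h | h
    · subst h; rw [evKey'_arr]; omega
    · have h2 := (List.pairwise_cons.mp (List.pairwise_cons.mp hQpw).2).1 q h
      rw [evKey'_arr] at h2
      omega
  have hfil : (mergeEvents sa sd).filter (fun p => decide (evKey' p ≤ 2 * u + 1))
      = P ++ [(u, -1)] := by
    rw [hE, show P ++ (u, (-1:Int)) :: (v, (1:Int)) :: R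
          = (P ++ [(u, -1)]) ++ ((v, 1) :: R) by simp]
    rw [List.filter_append]
    have h1 : (P ++ [(u, (-1:Int))]).filter (fun p => decide (evKey' p ≤ 2 * u + 1))
        = P ++ [(u, -1)] := by
      rw [List.filter_eq_self]
      intro p hp
      rcases List.mem_append.mp hp with h | h
      · simpa using hP p h
      · have : p = (u, -1) := by simpa using h
        subst this
        simp [evKey'_dep]
    have h2 : ((v, (1:Int)) :: R).filter (fun p => decide (evKey' p ≤ 2 * u + 1)) = [] := by
      rw [List.filter_eq_nil_iff]
      intro q hq
      have := hQ q hq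
      simp
      omega
    rw [h1, h2, List.append_nil]
  have hsum := filterK_sum sa sd u
  rw [hfil, sumD_append] at hsum
  have hsP1 : sumD [((u:Int), (-1:Int))] = -1 := by simp [sumD]
  rw [hsP1] at hsum
  have hbal : cnt sa u = cnt sd u := by
    have : sumD P = 1 := by omega
    omega
  have humem : u ∈ sd := by
    have : ((u:Int), (-1:Int)) ∈ mergeEvents sa sd := by
      rw [hE]; exact List.mem_append.mpr (Or.inr (by simp))
    rcases mergeEvents_mem sa sd _ this with ⟨h, _⟩ | ⟨_, h⟩
    · exact absurd h (by norm_num)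
    · exact h
  have hvmem : v ∈ sa := by
    have : ((v:Int), (1:Int)) ∈ mergeEvents sa sd := by
      rw [hE]; exact List.mem_append.mpr (Or.inr (by simp))
    rcases mergeEvents_mem sa sd _ this with ⟨_, h⟩ | ⟨h, _⟩
    · exact h
    · exact absurd h (by norm_num)
  have hlt : cnt sa u < (sa.length : Int) :=
    (cnt_lt_length_iff sa u hsa).mpr ⟨v, hvmem, huv⟩
  obtain ⟨hv1, hv2, hv3⟩ := getD_cnt_spec sa u hsa hlt
  -- the first arrival after u is exactly v
  have hgv : sa.getD (cnt sa u).toNat 0 = v := by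
    refine le_antisymm (hv3 v hvmem huv) ?_
    have hw : ((sa.getD (cnt sa u).toNat 0 : Int), (1:Int)) ∈ mergeEvents sa sd :=
      mem_merge_arr sa sd _ hv2
    rw [hE] at hw
    rcases List.mem_append.mp hw with h | h
    · have := hP _ h
      rw [evKey'_arr] at this
      omega
    · rcases List.mem_cons.mp h with h | h
      · exact absurd (congrArg Prod.snd h) (by norm_num)
      · rcases List.mem_cons.mp h with h | h
        · rw [(Prod.mk.injEq _ _ _ _).mp h |>.1]
        · have h2 := (List.pairwise_cons.mp (List.pairwise_cons.mp hQpw).2).1 _ h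
          rw [evKey'_arr, evKey'_arr] at h2
          omega
  -- no departure interrupts before v
  have hdep : ¬ (cnt sd u < (sd.length : Int) ∧ sd.getD (cnt sd u).toNat 0 < sa.getD (cnt sa u).toNat 0) := by
    rintro ⟨hl, hlt2⟩
    obtain ⟨hw1, hw2, _⟩ := getD_cnt_spec sd u hsd hl
    have hw : ((sd.getD (cnt sd u).toNat 0 : Int), (-1:Int)) ∈ mergeEvents sa sd :=
      mem_merge_dep sa sd _ hw2
    rw [hE] at hw
    rw [hgv] at hlt2
    rcases List.mem_append.mp hw with h | h
    · have := hP _ h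
      rw [evKey'_dep] at this
      omega
    · rcases List.mem_cons.mp h with h | h
      · have := (Prod.mk.injEq _ _ _ _).mp h |>.1
        omega
      · rcases List.mem_cons.mp h with h | h
        · exact absurd (congrArg Prod.snd h) (by norm_num)
        · have h2 := (List.pairwise_cons.mp (List.pairwise_cons.mp hQpw).2).1 _ h
          rw [evKey'_arr, evKey'_dep] at h2
          omega
  refine ⟨u, humem, ?_⟩
  unfold gapAt'
  rw [if_neg (by omega : ¬ cnt sa u ≠ cnt sd u), if_neg (by omega : ¬ cnt sa u = (sa.length : Int)),
    if_neg hdep, hgv, hxv]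

-- every gap B's test reports is emitted by the sweep
lemma dirB (sa sd : List Int) (hsa : sa.Pairwise (· ≤ ·)) (hsd : sd.Pairwise (· ≤ ·))
    (u x : Int) (hu : u ∈ sd) (hg : gapAt' sa sd u = some x) :
    x ∈ gapsFrom 0 (mergeEvents sa sd) := by
  unfold gapAt' at hg
  split_ifs at hg with h1 h2 h3
  have hbal : cnt sa u = cnt sd u := by omega
  have hlt : cnt sa u < (sa.length : Int) := lt_of_le_of_ne (cnt_le_length sa u) h2
  obtain ⟨hv1, hv2, hv3⟩ := getD_cnt_spec sa u hsa hlt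
  set v := sa.getD (cnt sa u).toNat 0 with hv
  have hxv : x = v - u := by
    have := Option.some.inj hg
    omega
  have hpw : (mergeEvents sa sd).Pairwise (fun p q => evKey' p ≤ evKey' q) :=
    mergeEvents_pairwise sa sd hsa hsd
  have hpm := merge_pm sa sd
  have hdec : mergeEvents sa sd
      = (mergeEvents sa sd).filter (fun p => decide (evKey' p ≤ 2 * u + 1))
        ++ (mergeEvents sa sd).filter (fun p => decide (2 * u + 1 < evKey' p)) :=
    sorted_filter_decomp evKey' (2 * u + 1) (mergeEvents sa sd) hpw
  set F1 := (mergeEvents sa sd).filter (fun p => decide (evKey' p ≤ 2 * u + 1)) with hF1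
  set F2 := (mergeEvents sa sd).filter (fun p => decide (2 * u + 1 < evKey' p)) with hF2
  -- F1 ends with the departure at u
  have huF1 : ((u:Int), (-1:Int)) ∈ F1 :=
    List.mem_filter.mpr ⟨mem_merge_dep sa sd u hu, by simp [evKey'_dep]⟩
  obtain ⟨q, z, hqz⟩ : ∃ q z, F1 = q ++ [z] := by
    rcases List.eq_nil_or_concat F1 with h | ⟨q, z, h⟩
    · rw [h] at huF1; cases huF1
    · exact ⟨q, z, by simpa using h⟩
  have hzpm : z.2 = (1:Int) ∨ z.2 = -1 := by
    have : z ∈ F1 := by rw [hqz]; simp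
    exact hpm z (List.mem_filter.mp this).1
  have hzkey : evKey' z ≤ 2 * u + 1 := by
    have : z ∈ F1 := by rw [hqz]; simp
    simpa using (List.mem_filter.mp this).2
  have hz : z = ((u:Int), (-1:Int)) := by
    rw [hqz] at huF1
    rcases List.mem_append.mp huF1 with h | h
    · have hF1pw : F1.Pairwise (fun p q => evKey' p ≤ evKey' q) := List.Pairwise.filter _ hpw
      rw [hqz] at hF1pw
      have := (List.pairwise_append.mp hF1pw).2.2 _ h z (by simp)
      rw [evKey'_dep] at this
      exact evKey'_inj z (u, -1) hzpm (by norm_num) (by rw [evKey'_dep]; omega)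
    · have h' : ((u:Int), (-1:Int)) = z := by simpa using h
      exact h'.symm
  -- F2 starts with the arrival at v
  have hvF2 : ((v:Int), (1:Int)) ∈ F2 :=
    List.mem_filter.mpr ⟨mem_merge_arr sa sd v hv2, by simp [evKey'_arr]; omega⟩
  obtain ⟨z2, t, hz2t⟩ : ∃ z2 t, F2 = z2 :: t := by
    cases h : F2 with
    | nil => rw [h] at hvF2; cases hvF2
    | cons z2 t => exact ⟨z2, t, rfl⟩
  have hz2mem : z2 ∈ mergeEvents sa sd := by
    have : z2 ∈ F2 := by rw [hz2t]; simp
    exact (List.mem_filter.mp this).1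
  have hz2pm := hpm z2 hz2mem
  have hz2key : 2 * u + 1 < evKey' z2 := by
    have : z2 ∈ F2 := by rw [hz2t]; simp
    simpa using (List.mem_filter.mp this).2
  have hz2le : evKey' z2 ≤ 2 * v := by
    rw [hz2t] at hvF2
    rcases List.mem_cons.mp hvF2 with h | h
    · rw [← h, evKey'_arr]
    · have hF2pw : F2.Pairwise (fun p q => evKey' p ≤ evKey' q) := List.Pairwise.filter _ hpw
      rw [hz2t] at hF2pw
      have := (List.pairwise_cons.mp hF2pw).1 _ h
      rwa [evKey'_arr] at this
  have hz2ge : 2 * v ≤ evKey' z2 := by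
    obtain ⟨w, dl⟩ := z2
    rcases mergeEvents_mem sa sd _ hz2mem with ⟨hdl, hwm⟩ | ⟨hdl, hwm⟩ <;> simp only at hdl <;> subst hdl
    · rw [evKey'_arr] at hz2key ⊢
      have : u < w := by omega
      have := hv3 w hwm this
      omega
    · rw [evKey'_dep] at hz2key ⊢
      have huw : u < w := by omega
      have hdl2 : cnt sd u < (sd.length : Int) := (cnt_lt_length_iff sd u hsd).mpr ⟨w, hwm, huw⟩
      have hnv : ¬ sd.getD (cnt sd u).toNat 0 < v := fun hlt2 => h3 ⟨hdl2, hlt2⟩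
      obtain ⟨_, _, hmin⟩ := getD_cnt_spec sd u hsd hdl2
      have := hmin w hwm huw
      omega
  have hz2 : z2 = ((v:Int), (1:Int)) :=
    evKey'_inj z2 (v, 1) hz2pm (by norm_num) (by rw [evKey'_arr]; omega)
  -- assemble the decomposition and the balance
  have hEdec : mergeEvents sa sd = q ++ ((u:Int), (-1:Int)) :: ((v:Int), (1:Int)) :: t := by
    rw [hdec, hqz, hz, hz2t, hz2]
    simp
  have hsum := filterK_sum sa sd u
  rw [← hF1, hqz, hz, sumD_append] at hsum
  have hsP1 : sumD [((u:Int), (-1:Int))] = -1 := by simp [sumD]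
  rw [hsP1, hbal] at hsum
  exact mem_gapsFrom.mpr ⟨q, u, v, t, hEdec, by omega, hxv⟩

-- ===== VERDICT (by name: the statement is the Claim_ definition above) =====
theorem find_spec : Claim_equal_find := by
  intro a d _
  unfold Spec_find find find_alt
  have hsa : (PySem.List.sorted a (fun x => x)).Pairwise (· ≤ ·) := by
    simpa using PySem.List.sorted_pairwise (xs := a) (key := fun x => x)
  have hsd : (PySem.List.sorted d (fun x => x)).Pairwise (· ≤ ·) := by
    simpa using PySem.List.sorted_pairwise (xs := d) (key := fun x => x)
  set sa := PySem.List.sorted a (fun x => x) with hsadef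
  set sd := PySem.List.sorted d (fun x => x) with hsddef
  rw [sort_eq]
  rw [sweep _ 0 0 none le_rfl (merge_pm sa sd)]
  have hp0 : pend none 0 0 (mergeEvents sa sd) = 0 := by
    cases h : mergeEvents sa sd with
    | nil => rfl
    | cons e r => obtain ⟨te, dle⟩ := e; rfl
  rw [hp0, scanB_eq_foldl, altLoop_eq_foldl]
  refine foldl_max_congr_mem _ _ _ ?_ ?_
  · intro x hx
    obtain ⟨u, hu, hgap⟩ := dirA sa sd hsa hsd x hx
    exact List.mem_filterMap.mpr ⟨u, hu, by rw [gapAt_eq sa sd hsa hsd]; exact hgap⟩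
  · intro x hx
    obtain ⟨u, hu, hgap⟩ := List.mem_filterMap.mp hx
    exact dirB sa sd hsa hsd u x hu (by rw [← gapAt_eq sa sd hsa hsd]; exact hgap)
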